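-- pv_equiv track=rewrite | github.com/jhonyesg/GoogleDriveSyncLinuxgui | lxdrive/utils/log_manager.py | _get_levels_up_to
-- ===== SOURCE A (Python) =====
-- def _get_levels_up_to(level: str) -> set:
--     """Obtiene los niveles de log hasta el nivel dado"""
--     levels = ["DEBUG", "INFO", "WARNING", "ERROR", "CRITICAL"]
--     valid_levels = set()
--     for l in levels:
--         valid_levels.add(l)
--         if l == level:
--             break
--     return valid_levels
-- ===== SOURCE B (Python) =====
-- def _get_levels_up_to(level: str) -> set:
--     """Obtiene los niveles de log hasta el nivel dado"""
--     ranks = {"DEBUG": 0, "INFO": 1, "WARNING": 2, "ERROR": 3, "CRITICAL": 4}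
--     cutoff = ranks.get(level, 4)
--     return {l for l, r in ranks.items() if r <= cutoff}
-- ===== Notes on version B (the rewrite author's own statement) =====
-- stated objective: alternative
-- what changed: Replaces the accumulate-and-break loop over the ordered list by a numeric-rank dictionary: look up the level's rank (default = max rank when unknown) and select by comparison all levels whose rank is <= that cutoff.
import Mathlib
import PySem

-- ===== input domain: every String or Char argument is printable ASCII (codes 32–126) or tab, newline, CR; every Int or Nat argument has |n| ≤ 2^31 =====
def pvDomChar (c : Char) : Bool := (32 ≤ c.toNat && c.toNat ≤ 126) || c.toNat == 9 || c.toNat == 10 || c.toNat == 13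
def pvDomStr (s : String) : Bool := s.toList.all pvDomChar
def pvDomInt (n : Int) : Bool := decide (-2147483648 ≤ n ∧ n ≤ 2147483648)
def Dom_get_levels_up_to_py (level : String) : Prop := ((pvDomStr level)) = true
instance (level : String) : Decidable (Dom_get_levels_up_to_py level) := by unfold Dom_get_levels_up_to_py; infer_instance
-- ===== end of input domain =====

-- B replaces A's accumulate-and-break loop by a rank dictionary: look up the level's rank
-- (default = max rank when unknown) and select all levels with rank ≤ that cutoff (alternative).

-- ===== PORT A =====
-- the loop 'for l in levels: valid_levels.add(l); if l == level: break'
def pvLoopA (level : String) : List String → PySem.Set String → PySem.Set String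
  | [], acc => acc
  | l :: rest, acc =>
      let acc' := PySem.Set.add acc l
      if l = level then acc' else pvLoopA level rest acc'

def get_levels_up_to_py (level : String) : List String :=
  pvLoopA level ["DEBUG", "INFO", "WARNING", "ERROR", "CRITICAL"] PySem.Set.empty

-- ===== PORT B =====
def get_levels_up_to_py_alt (level : String) : List String :=
  let ranks : PySem.Dict String Int :=
    PySem.Dict.ofList [("DEBUG", 0), ("INFO", 1), ("WARNING", 2), ("ERROR", 3), ("CRITICAL", 4)]
  let cutoff : Int := PySem.Dict.getD ranks level 4
  -- set comprehension {l for l, r in ranks.items() if r <= cutoff}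
  PySem.Set.ofList (((ranks.items.filter (fun p => p.2 ≤ cutoff)).map Prod.fst))

-- ===== PRECONDITION & SPEC =====
def Spec_get_levels_up_to_py (level : String) (out : List String) : Prop := out = get_levels_up_to_py_alt level
instance (level : String) (out : List String) : Decidable (Spec_get_levels_up_to_py level out) := by unfold Spec_get_levels_up_to_py; infer_instance

-- ===== CLAIM (what is proved, stated in full; the proofs are below) =====
def Claim_equal_get_levels_up_to_py : Prop := ∀ (level : String), Dom_get_levels_up_to_py level → Spec_get_levels_up_to_py level (get_levels_up_to_py level)

-- ===== LEMMAS AND PROOFS =====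

-- ===== VERDICT (by name: the statement is the Claim_ definition above) =====
theorem get_levels_up_to_py_spec : Claim_equal_get_levels_up_to_py := by
  intro level _
  unfold Spec_get_levels_up_to_py
  by_cases h1 : level = "DEBUG"; · subst h1; decide
  by_cases h2 : level = "INFO"; · subst h2; decide
  by_cases h3 : level = "WARNING"; · subst h3; decide
  by_cases h4 : level = "ERROR"; · subst h4; decide
  by_cases h5 : level = "CRITICAL"; · subst h5; decide
  have e1 : ("DEBUG" == level) = false := by simp [Ne.symm h1]
  have e2 : ("INFO" == level) = false := by simp [Ne.symm h2]
  have e3 : ("WARNING" == level) = false := by simp [Ne.symm h3]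
  have e4 : ("ERROR" == level) = false := by simp [Ne.symm h4]
  have e5 : ("CRITICAL" == level) = false := by simp [Ne.symm h5]
  simp [get_levels_up_to_py, get_levels_up_to_py_alt, pvLoopA,
    Ne.symm h1, Ne.symm h2, Ne.symm h3, Ne.symm h4, Ne.symm h5, e1, e2, e3, e4, e5,
    PySem.Dict.ofList, PySem.Dict.update, PySem.Dict.empty, PySem.Dict.insert,
    PySem.Dict.contains, PySem.Dict.getD, PySem.Dict.get?, List.find?,
    PySem.Set.add, PySem.Set.ofList, PySem.Set.empty, PySem.Set.contains]
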